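-- pv_equiv track=rewrite | github.com/georgeyjm/media-depot | cli.py | calculate_job_statistics
-- ===== SOURCE A (Python) =====
-- def calculate_job_statistics(jobs: list[dict], active_queue: list) -> dict[str, int]:
--     '''
--     Calculate statistics about job processing.
--
--     Args:
--         jobs: List of all job dictionaries
--         active_queue: List of active jobs in queue
--
--     Returns:
--         Dictionary with 'completed', 'failed', 'pending', 'processing', 'in_queue' counts
--     '''
--     return {
--         'completed': sum(1 for job in jobs if job.get('status') == 'completed'),
--         'failed': sum(1 for job in jobs if job.get('status') in ('failed', 'error', 'canceled')),
--         'pending': sum(1 for job in jobs if job.get('status') == 'pending'),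
--         'processing': sum(1 for job in jobs if job.get('status') == 'processing'),
--         'in_queue': len(active_queue)
--     }
-- ===== SOURCE B (Python) =====
-- def calculate_job_statistics(jobs: list, active_queue: list) -> dict:
--     completed = failed = pending = processing = 0
--     for job in jobs:
--         s = job.get('status')
--         if s == 'completed':
--             completed += 1
--         elif s in ('failed', 'error', 'canceled'):
--             failed += 1
--         elif s == 'pending':
--             pending += 1
--         elif s == 'processing':
--             processing += 1
--     return {
--         'completed': completed,
--         'failed': failed,
--         'pending': pending,
--         'processing': processing,
--         'in_queue': len(active_queue),
--     }
-- ===== Notes on version B (the rewrite author's own statement) =====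
-- stated objective: simpler
-- what changed: Replaces four separate generator-expression scans of jobs with a single explicit loop that classifies each job's status once into four counters.
import Mathlib
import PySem

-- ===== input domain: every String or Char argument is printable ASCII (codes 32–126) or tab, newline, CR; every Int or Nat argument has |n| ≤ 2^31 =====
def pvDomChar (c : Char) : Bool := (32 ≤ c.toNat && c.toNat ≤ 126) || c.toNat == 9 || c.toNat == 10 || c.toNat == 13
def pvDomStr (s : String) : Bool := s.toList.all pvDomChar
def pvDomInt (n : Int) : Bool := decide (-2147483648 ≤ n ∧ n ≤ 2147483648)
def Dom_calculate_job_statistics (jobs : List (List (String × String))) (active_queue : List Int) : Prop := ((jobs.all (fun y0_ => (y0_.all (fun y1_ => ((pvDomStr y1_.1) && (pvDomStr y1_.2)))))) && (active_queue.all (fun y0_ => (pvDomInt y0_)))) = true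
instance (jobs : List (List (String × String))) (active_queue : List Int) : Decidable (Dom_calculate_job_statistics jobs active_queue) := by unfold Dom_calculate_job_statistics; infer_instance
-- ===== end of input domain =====

-- B replaces A's four separate scans of jobs with one loop carrying four counters; objective: simpler.
-- ===== PORT A =====
def calculate_job_statistics (jobs : List (List (String × String))) (active_queue : List Int) : List (String × Int) :=
  [("completed", jobs.foldl (fun acc job => if job.lookup "status" = some "completed" then acc + 1 else acc) 0),
   ("failed", jobs.foldl (fun acc job => if job.lookup "status" = some "failed" ∨ job.lookup "status" = some "error" ∨ job.lookup "status" = some "canceled" then acc + 1 else acc) 0),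
   ("pending", jobs.foldl (fun acc job => if job.lookup "status" = some "pending" then acc + 1 else acc) 0),
   ("processing", jobs.foldl (fun acc job => if job.lookup "status" = some "processing" then acc + 1 else acc) 0),
   ("in_queue", (active_queue.length : Int))]

-- ===== PORT B =====
def altLoop : List (List (String × String)) → Int → Int → Int → Int → Int × Int × Int × Int
  | [], c, f, p, pr => (c, f, p, pr)
  | job :: rest, c, f, p, pr =>
    let s := job.lookup "status"
    if s = some "completed" then altLoop rest (c + 1) f p pr
    else if s = some "failed" ∨ s = some "error" ∨ s = some "canceled" then altLoop rest c (f + 1) p pr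
    else if s = some "pending" then altLoop rest c f (p + 1) pr
    else if s = some "processing" then altLoop rest c f p (pr + 1)
    else altLoop rest c f p pr

def calculate_job_statistics_alt (jobs : List (List (String × String))) (active_queue : List Int) : List (String × Int) :=
  let r := altLoop jobs 0 0 0 0
  [("completed", r.1), ("failed", r.2.1), ("pending", r.2.2.1), ("processing", r.2.2.2),
   ("in_queue", (active_queue.length : Int))]

-- ===== PRECONDITION & SPEC =====
def Spec_calculate_job_statistics (jobs : List (List (String × String))) (active_queue : List Int) (out : List (String × Int)) : Prop := out = calculate_job_statistics_alt jobs active_queue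
instance (jobs : List (List (String × String))) (active_queue : List Int) (out : List (String × Int)) : Decidable (Spec_calculate_job_statistics jobs active_queue out) := by unfold Spec_calculate_job_statistics; infer_instance

-- ===== CLAIM (what is proved, stated in full; the proofs are below) =====
def Claim_equal_calculate_job_statistics : Prop := ∀ (jobs : List (List (String × String))) (active_queue : List Int), Dom_calculate_job_statistics jobs active_queue → Spec_calculate_job_statistics jobs active_queue (calculate_job_statistics jobs active_queue)

-- ===== LEMMAS AND PROOFS =====
lemma altLoop_eq (jobs : List (List (String × String))) (c f p pr : Int) :
    altLoop jobs c f p pr =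
      (jobs.foldl (fun acc job => if job.lookup "status" = some "completed" then acc + 1 else acc) c,
       jobs.foldl (fun acc job => if job.lookup "status" = some "failed" ∨ job.lookup "status" = some "error" ∨ job.lookup "status" = some "canceled" then acc + 1 else acc) f,
       jobs.foldl (fun acc job => if job.lookup "status" = some "pending" then acc + 1 else acc) p,
       jobs.foldl (fun acc job => if job.lookup "status" = some "processing" then acc + 1 else acc) pr) := by
  induction jobs generalizing c f p pr with
  | nil => rfl
  | cons job rest ih =>
    simp only [altLoop]
    rcases h : job.lookup "status" with _ | s
    · simp [h, ih]
    · by_cases h1 : s = "completed"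
      · subst h1; simp [h, ih]
      · by_cases h2 : s = "failed" ∨ s = "error" ∨ s = "canceled"
        · rcases h2 with h2 | h2 | h2 <;> subst h2 <;> simp [h, ih]
        · push Not at h2
          by_cases h3 : s = "pending"
          · subst h3; simp [h, ih]
          · by_cases h4 : s = "processing"
            · subst h4; simp [h, ih]
            · simp [h, ih, h1, h2.1, h2.2.1, h2.2.2, h3, h4]

-- ===== VERDICT (by name: the statement is the Claim_ definition above) =====
theorem calculate_job_statistics_spec : Claim_equal_calculate_job_statistics := by
  intro jobs active_queue _
  unfold Spec_calculate_job_statistics calculate_job_statistics calculate_job_statistics_alt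
  rw [altLoop_eq]
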